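-- pv_equiv track=rewrite | github.com/Advenaa/Recursive-Idea-Model | rim/agents/advanced_verifier.py | _extract_advanced_checks
-- ===== SOURCE A (Python) =====
-- _SOLVER_PREFIXES = ("solver:", "solve:")
--
-- _FORMAL_SOLVER_PREFIXES = ("formal:", "theorem:", "constraint:")
--
-- _SIM_PREFIXES = ("simulate:", "simulation:")
--
-- _DATA_PREFIXES = ("data:", "dataset:")
--
-- def _extract_advanced_checks(constraints: list[str] | None, max_checks: int) -> list[dict[str, str]]:
--     checks: list[dict[str, str]] = []
--     for item in list(constraints or []):
--         text = str(item).strip()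
--         if not text:
--             continue
--         lowered = text.lower()
--         matched: dict[str, str] | None = None
--         for prefix in _FORMAL_SOLVER_PREFIXES:
--             if lowered.startswith(prefix):
--                 matched = {"kind": "formal_solver", "payload": text[len(prefix) :].strip()}
--                 break
--         if matched is None:
--             for prefix in _SOLVER_PREFIXES:
--                 if lowered.startswith(prefix):
--                     matched = {"kind": "solver", "payload": text[len(prefix) :].strip()}
--                     break
--         if matched is None:
--             for prefix in _SIM_PREFIXES:
--                 if lowered.startswith(prefix):
--                     matched = {"kind": "simulation", "payload": text[len(prefix) :].strip()}
--                     break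
--         if matched is None:
--             for prefix in _DATA_PREFIXES:
--                 if lowered.startswith(prefix):
--                     matched = {"kind": "data_reference", "payload": text[len(prefix) :].strip()}
--                     break
--         if matched is None:
--             continue
--         if matched["payload"]:
--             checks.append(matched)
--         if len(checks) >= max(1, int(max_checks)):
--             break
--     return checks
-- ===== SOURCE B (Python) =====
-- # B: tokenize at the first ':' and hash-look-up the tag, instead of scanning
-- # ordered prefix tuples with startswith; first cap classified items are kept.
--
-- _KIND_BY_TAG = {
--     "formal": "formal_solver",
--     "theorem": "formal_solver",
--     "constraint": "formal_solver",
--     "solver": "solver",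
--     "solve": "solver",
--     "simulate": "simulation",
--     "simulation": "simulation",
--     "data": "data_reference",
--     "dataset": "data_reference",
-- }
--
--
-- def _extract_advanced_checks(constraints, max_checks):
--     cap = max(1, int(max_checks))
--     checks = []
--     for item in constraints or []:
--         text = str(item).strip()
--         head, sep, _ = text.lower().partition(":")
--         kind = _KIND_BY_TAG.get(head) if sep else None
--         if kind is None:
--             continue
--         payload = text[len(head) + 1:].strip()
--         if not payload:
--             continue
--         checks.append({"kind": kind, "payload": payload})
--         if len(checks) == cap:
--             break
--     return checks
-- ===== Notes on version B (the rewrite author's own statement) =====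
-- stated objective: simpler
-- what changed: Instead of scanning four ordered tuples of colon-terminated prefixes with startswith, B tokenizes each item at its first ':' (str.partition) and resolves the tag with a single dict lookup; the colon-free tag uniquely determines the matching prefix, so priority order becomes irrelevant.
import Mathlib
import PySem

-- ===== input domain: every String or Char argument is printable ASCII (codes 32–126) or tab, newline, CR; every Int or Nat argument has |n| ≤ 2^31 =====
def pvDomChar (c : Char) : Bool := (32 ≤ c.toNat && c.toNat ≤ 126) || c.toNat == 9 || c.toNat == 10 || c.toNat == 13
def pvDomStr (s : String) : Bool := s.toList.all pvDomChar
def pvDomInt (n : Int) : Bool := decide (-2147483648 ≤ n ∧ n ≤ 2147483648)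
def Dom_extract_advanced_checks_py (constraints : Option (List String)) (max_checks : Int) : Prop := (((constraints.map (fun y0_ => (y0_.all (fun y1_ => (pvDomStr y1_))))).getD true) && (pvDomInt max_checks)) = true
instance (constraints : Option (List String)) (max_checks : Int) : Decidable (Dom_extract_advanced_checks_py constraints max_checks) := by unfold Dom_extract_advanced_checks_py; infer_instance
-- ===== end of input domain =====

-- B replaces A's four ordered startswith-prefix scans by tokenizing each item at its
-- first ':' and hash-looking the tag up in one dict (objective: simpler).

-- ===== PORT A =====
-- inner 'for prefix in <tuple>' loop of A (shared shape of its four copies)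
def aScan (prefixes : List String) (kind text lowered : String) : Option (List (String × String)) :=
  match prefixes with
  | [] => none
  | pre :: rest =>
    if PySem.Str.startswith lowered pre then
      some [("kind", kind), ("payload", PySem.Str.strip (PySem.Str.slice text (some (PySem.Str.len pre)) none))]
    else aScan rest kind text lowered

-- the 'matched' chain of A: four scans, each tried only if the previous left none
def aMatched (text lowered : String) : Option (List (String × String)) :=
  let matched := aScan ["formal:", "theorem:", "constraint:"] "formal_solver" text lowered
  let matched := match matched with
    | none => aScan ["solver:", "solve:"] "solver" text lowered
    | some m => some m
  let matched := match matched with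
    | none => aScan ["simulate:", "simulation:"] "simulation" text lowered
    | some m => some m
  match matched with
  | none => aScan ["data:", "dataset:"] "data_reference" text lowered
  | some m => some m

-- the main 'for item in list(constraints or [])' loop
-- (matched["payload"] is a first-match assoc lookup, List.lookup; the key is always present, so this is exact)
def aLoop (items : List String) (checks : List (List (String × String))) (max_checks : Int) : List (List (String × String)) :=
  match items with
  | [] => checks
  | item :: rest =>
    let text := PySem.Str.strip item
    if text = "" then aLoop rest checks max_checks
    else
      let lowered := PySem.Str.lower text
      match aMatched text lowered with
      | none => aLoop rest checks max_checks
      | some m =>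
        let checks := if (List.lookup "payload" m).getD "" ≠ "" then checks ++ [m] else checks
        if (checks.length : Int) ≥ max 1 max_checks then checks
        else aLoop rest checks max_checks

def extract_advanced_checks_py (constraints : Option (List String)) (max_checks : Int) : List (List (String × String)) :=
  aLoop (constraints.getD []) [] max_checks

-- ===== PORT B =====
-- Source B's _KIND_BY_TAG dict
def bTagKinds : PySem.Dict String String :=
  PySem.Dict.ofList
    [("formal", "formal_solver"), ("theorem", "formal_solver"), ("constraint", "formal_solver"),
     ("solver", "solver"), ("solve", "solver"),
     ("simulate", "simulation"), ("simulation", "simulation"),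
     ("data", "data_reference"), ("dataset", "data_reference")]

-- the (head, sep) part of Python's s.partition(":"): 'some head' iff ':' occurs in s
-- (exact hand port: head = the characters before the first ':'; none = sep absent)
def bPartitionHead : List Char → Option (List Char)
  | [] => none
  | c :: rest => if c = ':' then some [] else (bPartitionHead rest).map (c :: ·)

-- Source B's 'for item in constraints or []' loop with the checks accumulator and break
def bLoop (items : List String) (checks : List (List (String × String))) (cap : Int) : List (List (String × String)) :=
  match items with
  | [] => checks
  | item :: rest =>
    let text := PySem.Str.strip item
    match bPartitionHead (PySem.Str.lower text).toList with
    | none => bLoop rest checks cap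
    | some head =>
      match bTagKinds.get? (String.ofList head) with
      | none => bLoop rest checks cap
      | some kind =>
        let payload := PySem.Str.strip (PySem.Str.slice text (some ((head.length : Int) + 1)) none)
        if payload = "" then bLoop rest checks cap
        else
          let checks := checks ++ [[("kind", kind), ("payload", payload)]]
          if (checks.length : Int) = cap then checks else bLoop rest checks cap

def extract_advanced_checks_py_alt (constraints : Option (List String)) (max_checks : Int) : List (List (String × String)) :=
  bLoop (constraints.getD []) [] (max 1 max_checks)

-- ===== PRECONDITION & SPEC =====
def Spec_extract_advanced_checks_py (constraints : Option (List String)) (max_checks : Int) (out : List (List (String × String))) : Prop := out = extract_advanced_checks_py_alt constraints max_checks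
instance (constraints : Option (List String)) (max_checks : Int) (out : List (List (String × String))) : Decidable (Spec_extract_advanced_checks_py constraints max_checks out) := by unfold Spec_extract_advanced_checks_py; infer_instance

-- ===== CLAIM (what is proved, stated in full; the proofs are below) =====
def Claim_equal_extract_advanced_checks_py : Prop := ∀ (constraints : Option (List String)) (max_checks : Int), Dom_extract_advanced_checks_py constraints max_checks → Spec_extract_advanced_checks_py constraints max_checks (extract_advanced_checks_py constraints max_checks)

-- ===== LEMMAS AND PROOFS =====

-- proof-side helper: A's prefix scan flattened into one table and post-filtered by
-- payload truthiness (the shape both per-item steps are reduced to)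
def pScan (table : List (String × String)) (text lowered : String) : Option (List (String × String)) :=
  match table with
  | [] => none
  | (pre, kind) :: rest =>
    if PySem.Str.startswith lowered pre then
      let payload := PySem.Str.strip (PySem.Str.slice text (some (PySem.Str.len pre)) none)
      if payload = "" then none else some [("kind", kind), ("payload", payload)]
    else pScan rest text lowered

def pTags : List (String × String) :=
  [("formal", "formal_solver"), ("theorem", "formal_solver"), ("constraint", "formal_solver"),
   ("solver", "solver"), ("solve", "solver"),
   ("simulate", "simulation"), ("simulation", "simulation"),
   ("data", "data_reference"), ("dataset", "data_reference")]

-- B's per-item step as an Option (used only in the proofs)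
def bStepO (item : String) : Option (List (String × String)) :=
  let text := PySem.Str.strip item
  match bPartitionHead (PySem.Str.lower text).toList with
  | none => none
  | some head =>
    match bTagKinds.get? (String.ofList head) with
    | none => none
    | some kind =>
      let payload := PySem.Str.strip (PySem.Str.slice text (some ((head.length : Int) + 1)) none)
      if payload = "" then none else some [("kind", kind), ("payload", payload)]

theorem lookup_payload (k p : String) :
    (List.lookup "payload" [("kind", k), ("payload", p)]).getD "" = p := by
  simp [List.lookup]

-- pScan over a block of prefixes sharing one kind is A's inner scan followed by the
-- payload filter, continuing into the rest of the table on no match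
theorem pScan_map_append (ps : List String) (kind : String) (rest : List (String × String))
    (text lowered : String) :
    pScan (ps.map (fun p => (p, kind)) ++ rest) text lowered =
      match aScan ps kind text lowered with
      | none => pScan rest text lowered
      | some m => if (List.lookup "payload" m).getD "" ≠ "" then some m else none := by
  induction ps with
  | nil => simp [aScan]
  | cons pre ps ih =>
    simp only [List.map_cons, List.cons_append, pScan, aScan]
    by_cases hs : PySem.Str.startswith lowered pre = true
    · simp only [if_pos hs, lookup_payload]
      simp
    · simp only [if_neg hs, ih]

-- the single-table scan agrees with A's four-scan matched chain plus the payload filter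
theorem pScan_eq_aMatched (text lowered : String) :
    pScan (pTags.map (fun p => (p.1 ++ ":", p.2))) text lowered =
      match aMatched text lowered with
      | none => none
      | some m => if (List.lookup "payload" m).getD "" ≠ "" then some m else none := by
  rw [show pTags.map (fun p => (p.1 ++ ":", p.2)) =
      (["formal:", "theorem:", "constraint:"].map (fun p => (p, "formal_solver"))) ++
      ((["solver:", "solve:"].map (fun p => (p, "solver"))) ++
       ((["simulate:", "simulation:"].map (fun p => (p, "simulation"))) ++
        ((["data:", "dataset:"].map (fun p => (p, "data_reference"))) ++ []))) from rfl]
  rw [pScan_map_append]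
  simp only [aMatched]
  cases aScan ["formal:", "theorem:", "constraint:"] "formal_solver" text lowered with
  | some m => rfl
  | none =>
    rw [pScan_map_append]
    cases aScan ["solver:", "solve:"] "solver" text lowered with
    | some m => rfl
    | none =>
      rw [pScan_map_append]
      cases aScan ["simulate:", "simulation:"] "simulation" text lowered with
      | some m => rfl
      | none =>
        rw [pScan_map_append]
        cases aScan ["data:", "dataset:"] "data_reference" text lowered with
        | some m => rfl
        | none => rfl

theorem bPartitionHead_none {l : List Char} (h : bPartitionHead l = none) : ':' ∉ l := by
  induction l with
  | nil => simp
  | cons c rest ih =>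
    simp only [bPartitionHead] at h
    by_cases hc : c = ':'
    · rw [if_pos hc] at h; exact absurd h (by simp)
    · rw [if_neg hc] at h
      cases hr : bPartitionHead rest with
      | none =>
        simp only [hr, Option.map_none] at h ⊢
        intro hmem
        rcases List.mem_cons.mp hmem with h1 | h2
        · exact hc h1.symm
        · exact ih hr h2
      | some hd => rw [hr] at h; simp at h
  
theorem bPartitionHead_some {l hd : List Char} (h : bPartitionHead l = some hd) :
    ':' ∉ hd ∧ ∃ t, l = hd ++ ':' :: t := by
  induction l generalizing hd with
  | nil => simp [bPartitionHead] at h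
  | cons c rest ih =>
    simp only [bPartitionHead] at h
    by_cases hc : c = ':'
    · rw [if_pos hc] at h
      simp only [Option.some.injEq] at h
      subst h; subst hc
      exact ⟨by simp, rest, rfl⟩
    · rw [if_neg hc] at h
      cases hr : bPartitionHead rest with
      | none => rw [hr] at h; simp at h
      | some hd' =>
        rw [hr] at h
        simp only [Option.map_some, Option.some.injEq] at h
        obtain ⟨hn, t, ht⟩ := ih hr
        subst h
        refine ⟨?_, t, by simp [ht]⟩
        intro hmem
        rcases List.mem_cons.mp hmem with h1 | h2
        · exact hc h1.symm
        · exact hn h2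

-- a colon-terminated prefix of a list whose first colon ends 'b' pins down the tag
theorem prefix_colon {a b t : List Char} (ha : ':' ∉ a) (hb : ':' ∉ b) :
    (a ++ [':']) <+: (b ++ ':' :: t) ↔ a = b := by
  constructor
  · intro h
    induction a generalizing b with
    | nil =>
      cases b with
      | nil => rfl
      | cons d b' =>
        rw [List.nil_append, List.cons_append, List.cons_prefix_cons] at h
        exact absurd (List.mem_cons_self) (by rw [← h.1] at hb; exact hb)
    | cons c a' ih =>
      cases b with
      | nil =>
        rw [List.cons_append, List.nil_append, List.cons_prefix_cons] at h
        exact absurd (List.mem_cons_self) (by rw [h.1] at ha; exact ha)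
      | cons d b' =>
        rw [List.cons_append, List.cons_append, List.cons_prefix_cons] at h
        have ha' : ':' ∉ a' := fun hm => ha (List.mem_cons_of_mem _ hm)
        have hb' : ':' ∉ b' := fun hm => hb (List.mem_cons_of_mem _ hm)
        rw [h.1, ih ha' hb' h.2]
  · rintro rfl
    exact ⟨t, by simp⟩

-- pScan over tagged prefixes 'tag ++ ":"' is partition-at-first-colon plus assoc lookup
theorem pScan_eq_lookup (pairs : List (String × String))
    (hp : ∀ p ∈ pairs, ':' ∉ p.1.toList) (text lowered : String) :
    pScan (pairs.map (fun p => (p.1 ++ ":", p.2))) text lowered =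
      match bPartitionHead lowered.toList with
      | none => none
      | some head =>
        match (PySem.Dict.mk pairs).get? (String.ofList head) with
        | none => none
        | some kind =>
          let payload := PySem.Str.strip (PySem.Str.slice text (some ((head.length : Int) + 1)) none)
          if payload = "" then none else some [("kind", kind), ("payload", payload)] := by
  induction pairs with
  | nil =>
    cases hpart : bPartitionHead lowered.toList with
    | none => rfl
    | some head => simp [pScan, PySem.Dict.get?]
  | cons p ps ih =>
    have hp' : ∀ q ∈ ps, ':' ∉ q.1.toList := fun q hq => hp q (List.mem_cons_of_mem _ hq)
    have hic := ih hp'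
    simp only [List.map_cons, pScan]
    cases hpart : bPartitionHead lowered.toList with
    | none =>
      rw [hpart] at hic
      have hcol := bPartitionHead_none hpart
      have hsw : PySem.Str.startswith lowered (p.1 ++ ":") = false := by
        rw [Bool.eq_false_iff]
        intro htrue
        rw [PySem.Str.startswith_eq] at htrue
        have hpre := (PySem.Chars.startswith_iff _ _).mp htrue
        exact hcol (hpre.subset (by simp))
      rw [hsw]
      simpa using hic
    | some head =>
      rw [hpart] at hic
      obtain ⟨hnh, t, hl⟩ := bPartitionHead_some hpart
      dsimp only at hic ⊢
      rw [PySem.Dict.get?_mk_cons _ _ _ _]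
      have hkey : PySem.Str.startswith lowered (p.1 ++ ":") = true ↔ p.1.toList = head := by
        rw [PySem.Str.startswith_eq, PySem.Chars.startswith_iff]
        simp only [String.toList_append]
        have : (":" : String).toList = [':'] := rfl
        rw [this, hl]
        exact prefix_colon (hp p (List.mem_cons_self)) hnh
      by_cases hsw : PySem.Str.startswith lowered (p.1 ++ ":") = true
      · have hhd : p.1.toList = head := hkey.mp hsw
        have hbeq : (p.1 == String.ofList head) = true := by
          rw [beq_iff_eq, ← hhd, String.ofList_toList]
        rw [hsw, if_pos rfl, hbeq, if_pos rfl]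
        have hlen : PySem.Str.len (p.1 ++ ":") = (head.length : Int) + 1 := by
          rw [PySem.Str.len_eq]
          simp [← hhd]
        rw [hlen]
      · have hbeq : (p.1 == String.ofList head) = false := by
          rw [Bool.eq_false_iff, ne_eq, beq_iff_eq]
          intro hq
          exact hsw (hkey.mpr (by rw [hq]; simp))
        rw [if_neg hsw, hbeq, if_neg (by simp)]
        simpa using hic

-- B's step equals A's matched chain plus payload filter
theorem bStepO_eq (item : String) :
    bStepO item =
      match aMatched (PySem.Str.strip item) (PySem.Str.lower (PySem.Str.strip item)) with
      | none => none
      | some m => if (List.lookup "payload" m).getD "" ≠ "" then some m else none := by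
  rw [← pScan_eq_aMatched]
  have hmk : bTagKinds = PySem.Dict.mk pTags := by decide
  have := pScan_eq_lookup pTags (by decide)
    (PySem.Str.strip item) (PySem.Str.lower (PySem.Str.strip item))
  rw [show pTags.map (fun p => (p.1 ++ ":", p.2)) =
      [("formal:", "formal_solver"), ("theorem:", "formal_solver"), ("constraint:", "formal_solver"),
       ("solver:", "solver"), ("solve:", "solver"),
       ("simulate:", "simulation"), ("simulation:", "simulation"),
       ("data:", "data_reference"), ("dataset:", "data_reference")] from rfl] at this
  rw [show ([("formal:", "formal_solver"), ("theorem:", "formal_solver"), ("constraint:", "formal_solver"),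
       ("solver:", "solver"), ("solve:", "solver"),
       ("simulate:", "simulation"), ("simulation:", "simulation"),
       ("data:", "data_reference"), ("dataset:", "data_reference")] : List (String × String)) =
      pTags.map (fun p => (p.1 ++ ":", p.2)) from rfl] at this
  rw [this, bStepO, hmk]

-- bLoop unfolded through bStepO
theorem bLoop_cons (item : String) (rest : List String)
    (checks : List (List (String × String))) (cap : Int) :
    bLoop (item :: rest) checks cap =
      match bStepO item with
      | none => bLoop rest checks cap
      | some m =>
        let checks' := checks ++ [m]
        if (checks'.length : Int) = cap then checks' else bLoop rest checks' cap := by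
  simp only [bLoop, bStepO]
  cases bPartitionHead (PySem.Str.lower (PySem.Str.strip item)).toList with
  | none => rfl
  | some head =>
    dsimp only
    cases bTagKinds.get? (String.ofList head) with
    | none => rfl
    | some kind =>
      dsimp only
      by_cases hp : PySem.Str.strip (PySem.Str.slice (PySem.Str.strip item) (some ((head.length : Int) + 1)) none) = ""
      · simp [hp]
      · simp [hp]

theorem loop_eq (items : List String) (mc : Int) :
    ∀ checks : List (List (String × String)), (checks.length : Int) < max 1 mc →
      aLoop items checks mc = bLoop items checks (max 1 mc) := by
  induction items with
  | nil => intro checks _; rfl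
  | cons item rest ih =>
    intro checks hlen
    rw [bLoop_cons, bStepO_eq]
    by_cases ht : PySem.Str.strip item = ""
    · have hm : aMatched (PySem.Str.strip item) (PySem.Str.lower (PySem.Str.strip item)) = none := by
        rw [ht]; rfl
      rw [hm]
      show aLoop (item :: rest) checks mc = bLoop rest checks (max 1 mc)
      rw [aLoop, if_pos ht]
      exact ih checks hlen
    · have hA : aLoop (item :: rest) checks mc =
          (match aMatched (PySem.Str.strip item) (PySem.Str.lower (PySem.Str.strip item)) with
           | none => aLoop rest checks mc
           | some m =>
             let checks' := if (List.lookup "payload" m).getD "" ≠ "" then checks ++ [m] else checks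
             if (checks'.length : Int) ≥ max 1 mc then checks'
             else aLoop rest checks' mc) := by
        rw [aLoop, if_neg ht]
      rw [hA]
      cases aMatched (PySem.Str.strip item) (PySem.Str.lower (PySem.Str.strip item)) with
      | none => exact ih checks hlen
      | some m =>
        by_cases hpay : (List.lookup "payload" m).getD "" ≠ ""
        · simp only [if_pos hpay]
          by_cases hb : ((checks ++ [m]).length : Int) ≥ max 1 mc
          · have heq : ((checks ++ [m]).length : Int) = max 1 mc := by
              simp only [List.length_append, List.length_cons, List.length_nil] at hb ⊢
              push_cast at hb hlen ⊢
              omega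
            simp only [if_pos hb, if_pos heq]
          · have hne : ¬ ((checks ++ [m]).length : Int) = max 1 mc := by omega
            have hlt : ((checks ++ [m]).length : Int) < max 1 mc := by omega
            simp only [if_neg hb, if_neg hne]
            exact ih _ hlt
        · have hb : ¬ ((checks.length : Int) ≥ max 1 mc) := by omega
          simp only [if_neg hpay, if_neg hb]
          exact ih checks hlen

-- ===== VERDICT (by name: the statement is the Claim_ definition above) =====
theorem extract_advanced_checks_py_spec : Claim_equal_extract_advanced_checks_py := by
  intro constraints max_checks _
  unfold Spec_extract_advanced_checks_py extract_advanced_checks_py extract_advanced_checks_py_alt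
  exact loop_eq _ _ [] (by simp)
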